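-- pv_equiv track=rewrite | github.com/ezpogue/CS170Project1 | 8puzzle.py | generategoal
-- ===== SOURCE A (Python) =====
-- def generategoal(dim): #Generates a goal state given the dimension of the puzzle
--         goal = list()
--         num = 1
--         for i in range(0, dim):
--             temp = list()
--             for j in range(0, dim):
--                 if i == dim - 1 and j == dim - 1:
--                     temp.append(0)
--                 else:
--                     temp.append(num)
--                 num += 1
--             goal.append(temp)
--         return goal
-- ===== SOURCE B (Python) =====
-- def generategoal(dim): #Generates a goal state given the dimension of the puzzle
--     if dim <= 0:
--         return []
--     flat = list(range(1, dim * dim)) + [0]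
--     return [flat[i * dim:(i + 1) * dim] for i in range(dim)]
-- ===== Notes on version B (the rewrite author's own statement) =====
-- stated objective: simpler
-- what changed: Builds the flat goal sequence in closed form with the blank tile appended last and reshapes it into rows by slicing, replacing the nested loops with their running counter and per-cell last-cell conditional.
import Mathlib
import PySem

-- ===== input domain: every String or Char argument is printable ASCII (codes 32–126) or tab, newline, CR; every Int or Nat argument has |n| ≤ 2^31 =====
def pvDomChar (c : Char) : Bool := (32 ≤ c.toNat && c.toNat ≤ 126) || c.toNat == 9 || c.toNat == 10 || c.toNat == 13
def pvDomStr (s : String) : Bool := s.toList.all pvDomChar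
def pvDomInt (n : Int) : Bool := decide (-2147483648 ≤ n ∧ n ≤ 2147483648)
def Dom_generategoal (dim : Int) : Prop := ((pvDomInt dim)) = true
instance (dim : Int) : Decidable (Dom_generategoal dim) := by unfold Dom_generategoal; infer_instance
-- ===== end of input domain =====

-- B builds the flat goal sequence in closed form (blank tile appended last) and reshapes it
-- by slicing, instead of A's nested loops with a running counter and a last-cell conditional
-- (objective: simpler).

-- ===== PORT A =====
def generategoal (dim : Int) : List (List Int) :=
  ((PySem.List.pyRange 0 dim 1).foldl
    (fun (st : List (List Int) × Int) i =>
      let inner := (PySem.List.pyRange 0 dim 1).foldl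
        (fun (t : List Int × Int) j =>
          (t.1 ++ [if i = dim - 1 ∧ j = dim - 1 then 0 else t.2], t.2 + 1))
        ([], st.2)
      (st.1 ++ [inner.1], inner.2))
    ([], 1)).1

-- ===== PORT B =====
def generategoal_alt (dim : Int) : List (List Int) :=
  if dim ≤ 0 then []
  else
    let flat : List Int := PySem.List.pyRange 1 (dim * dim) 1 ++ [0]
    (PySem.List.pyRange 0 dim 1).map
      (fun i => PySem.List.slice flat (some (i * dim)) (some ((i + 1) * dim)))

-- ===== PRECONDITION & SPEC =====
def Spec_generategoal (dim : Int) (out : List (List Int)) : Prop := out = generategoal_alt dim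
instance (dim : Int) (out : List (List Int)) : Decidable (Spec_generategoal dim out) := by unfold Spec_generategoal; infer_instance

-- ===== CLAIM (what is proved, stated in full; the proofs are below) =====
def Claim_equal_generategoal : Prop := ∀ (dim : Int), Dom_generategoal dim → Spec_generategoal dim (generategoal dim)

-- ===== LEMMAS AND PROOFS =====

-- the value of A's inner loop, as a recursive row builder
def rowF (dim i : Int) : List Int → Int → List Int
  | [], _ => []
  | j :: js, num => (if i = dim - 1 ∧ j = dim - 1 then 0 else num) :: rowF dim i js (num + 1)

lemma rowF_length (dim i : Int) (js : List Int) (num : Int) :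
    (rowF dim i js num).length = js.length := by
  induction js generalizing num with
  | nil => rfl
  | cons j js ih => simp [rowF, ih]

lemma rowF_getElem (dim i : Int) (js : List Int) (num : Int) (k : Nat) (hk : k < js.length)
    (hk' : k < (rowF dim i js num).length) :
    (rowF dim i js num)[k] =
      if i = dim - 1 ∧ js[k] = dim - 1 then 0 else num + k := by
  induction js generalizing num k with
  | nil => simp at hk
  | cons j js ih =>
    cases k with
    | zero => simp [rowF]
    | succ k =>
      simp only [rowF, List.getElem_cons_succ]
      have hk2 : k < js.length := by simpa using hk
      rw [ih (num + 1) k hk2 (by simpa [rowF_length] using hk2)]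
      split_ifs with h
      · rfl
      · push_cast; ring

lemma inner_fold (dim i : Int) (js : List Int) (acc : List Int) (num : Int) :
    js.foldl
      (fun (t : List Int × Int) j =>
        (t.1 ++ [if i = dim - 1 ∧ j = dim - 1 then 0 else t.2], t.2 + 1))
      (acc, num)
    = (acc ++ rowF dim i js num, num + js.length) := by
  induction js generalizing acc num with
  | nil => simp [rowF]
  | cons j js ih =>
    simp only [List.foldl_cons, rowF]
    rw [ih]
    simp only [Prod.mk.injEq]
    refine ⟨by simp, by push_cast [List.length_cons]; ring⟩

-- the value of A's outer loop
def rowsF (dim : Int) (js : List Int) : List Int → Int → List (List Int)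
  | [], _ => []
  | i :: is, num => rowF dim i js num :: rowsF dim js is (num + js.length)

lemma rowsF_length (dim : Int) (js is : List Int) (num : Int) :
    (rowsF dim js is num).length = is.length := by
  induction is generalizing num with
  | nil => rfl
  | cons i is ih => simp [rowsF, ih]

lemma rowsF_getElem (dim : Int) (js is : List Int) (num : Int) (r : Nat) (hr : r < is.length)
    (hr' : r < (rowsF dim js is num).length) :
    (rowsF dim js is num)[r] = rowF dim is[r] js (num + r * js.length) := by
  induction is generalizing num r with
  | nil => simp at hr
  | cons i is ih =>
    cases r with
    | zero => simp [rowsF]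
    | succ r =>
      simp only [rowsF, List.getElem_cons_succ]
      have hr2 : r < is.length := by simpa using hr
      rw [ih (num + js.length) r hr2 (by simpa [rowsF_length] using hr2)]
      congr 1
      push_cast; ring

lemma outer_fold_aux (dim : Int) (js is : List Int) (acc : List (List Int)) (num : Int) :
    is.foldl
      (fun (st : List (List Int) × Int) i => (st.1 ++ [rowF dim i js st.2], st.2 + (js.length : Int)))
      (acc, num)
    = (acc ++ rowsF dim js is num, num + is.length * js.length) := by
  induction is generalizing acc num with
  | nil => simp [rowsF]
  | cons i is ih =>
    simp only [List.foldl_cons, rowsF]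
    rw [ih]
    simp only [Prod.mk.injEq]
    refine ⟨by simp, by push_cast [List.length_cons]; ring⟩

lemma outer_fold (dim : Int) (js is : List Int) (acc : List (List Int)) (num : Int) :
    is.foldl
      (fun (st : List (List Int) × Int) i =>
        let inner := js.foldl
          (fun (t : List Int × Int) j =>
            (t.1 ++ [if i = dim - 1 ∧ j = dim - 1 then 0 else t.2], t.2 + 1))
          ([], st.2)
        (st.1 ++ [inner.1], inner.2))
      (acc, num)
    = (acc ++ rowsF dim js is num, num + is.length * js.length) := by
  simp only [inner_fold, List.nil_append]
  exact outer_fold_aux dim js is acc num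

-- the last-cell condition, arithmetically
lemma last_cell_iff (n r k : Nat) (hn : 0 < n) (hr : r < n) (hk : k < n) :
    r * n + k = n * n - 1 ↔ (r = n - 1 ∧ k = n - 1) := by
  have hnn : (n - 1) * n = n * n - n := by rw [Nat.sub_mul, one_mul]
  have hle : n ≤ n * n := Nat.le_mul_of_pos_left n hn
  constructor
  · intro h
    have hr' : r = n - 1 := by
      by_contra hne
      have h2 : (r + 1) * n ≤ (n - 1) * n := Nat.mul_le_mul_right n (by omega)
      have hstep : r * n + n ≤ n * n - n := by
        calc r * n + n = (r + 1) * n := by ring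
          _ ≤ (n - 1) * n := h2
          _ = n * n - n := hnn
      generalize hA : r * n = a at h hstep
      generalize hB : n * n = b at h hstep hle
      omega
    refine ⟨hr', ?_⟩
    subst hr'
    rw [hnn] at h
    generalize hB : n * n = b at h hle
    omega
  · rintro ⟨hr', hk'⟩
    subst hr'; subst hk'
    rw [hnn]
    generalize hB : n * n = b at hle ⊢
    omega

-- main equality for positive dimension, stated over Nat
lemma main_pos (n : Nat) (hn : 0 < n) :
    generategoal (n : Int) = generategoal_alt (n : Int) := by
  have hrange : PySem.List.pyRange 0 (n : Int) 1 = List.map (fun k : Nat => (k : Int)) (List.range n) := by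
    rw [PySem.List.pyRange_one]
    have h1 : ((n : Int) - 0).toNat = n := by omega
    rw [h1]
    exact List.map_congr_left (fun k _ => by simp)
  have hcast : ((n : Int) * n - 1).toNat = n * n - 1 := by
    have h : (n : Int) * n = ((n * n : Nat) : Int) := by push_cast; ring
    rw [h]
    generalize (n * n : Nat) = m
    omega
  have hflat : PySem.List.pyRange 1 ((n : Int) * n) 1
      = List.map (fun k : Nat => 1 + (k : Int)) (List.range (n * n - 1)) := by
    rw [PySem.List.pyRange_one, hcast]
  unfold generategoal generategoal_alt
  rw [if_neg (by omega : ¬ (n : Int) ≤ 0)]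
  rw [hrange, hflat, outer_fold]
  simp only [List.nil_append]
  set flat : List Int := List.map (fun k : Nat => 1 + (k : Int)) (List.range (n * n - 1)) ++ [0] with hflat2
  have hflatlen : flat.length = n * n := by
    have hpos : 0 < n * n := Nat.mul_pos hn hn
    rw [hflat2]
    simp only [List.length_append, List.length_map, List.length_range, List.length_cons,
      List.length_nil]
    omega
  apply List.ext_getElem
  · simp [rowsF_length]
  intro r h1 h2
  have hr : r < n := by simpa [rowsF_length] using h1
  rw [rowsF_getElem _ _ _ _ _ (by simpa using hr) h1]
  simp only [List.getElem_map, List.getElem_range, List.length_map, List.length_range]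
  have hb1 : (r : Int) * n = ((r * n : Nat) : Int) := by push_cast; ring
  have hb2 : ((r : Int) + 1) * (n : Int) = ((r * n : Nat) : Int) + ((n : Nat) : Int) := by push_cast; ring
  rw [hb1, hb2, PySem.List.slice_natCast_add]
  have hrn : r * n + n ≤ n * n := by
    calc r * n + n = (r + 1) * n := by ring
      _ ≤ n * n := Nat.mul_le_mul_right n (by omega)
  apply List.ext_getElem
  · simp only [rowF_length, List.length_map, List.length_range, List.length_take,
      List.length_drop, hflatlen]
    generalize hA : r * n = a at hrn ⊢
    generalize hB : n * n = b at hrn ⊢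
    omega
  intro k hk1 hk2
  have hkn : k < n := by simpa [rowF_length] using hk1
  rw [rowF_getElem _ _ _ _ _ (by simpa using hkn) hk1]
  simp only [List.getElem_map, List.getElem_range]
  rw [List.getElem_take, List.getElem_drop]
  have hub : r * n + k < n * n :=
    lt_of_lt_of_le (Nat.add_lt_add_left hkn (r * n)) hrn
  by_cases hlast : r * n + k = n * n - 1
  · obtain ⟨h1', h2'⟩ := (last_cell_iff n r k hn hr hkn).mp hlast
    rw [if_pos ⟨by omega, by omega⟩]
    have hge : (List.map (fun k : Nat => 1 + (k : Int)) (List.range (n * n - 1))).length ≤ r * n + k := by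
      simp only [List.length_map, List.length_range]
      omega
    simp only [hflat2]
    rw [List.getElem_append_right hge]
    simp
  · have hA : ¬ ((r : Int) = (n : Int) - 1 ∧ (k : Int) = (n : Int) - 1) := by
      rintro ⟨h1', h2'⟩
      exact hlast ((last_cell_iff n r k hn hr hkn).mpr ⟨by omega, by omega⟩)
    rw [if_neg hA]
    have hlt : r * n + k < (List.map (fun k : Nat => 1 + (k : Int)) (List.range (n * n - 1))).length := by
      simp only [List.length_map, List.length_range]
      generalize hA2 : r * n + k = a at hlast hub ⊢
      generalize hB2 : n * n = b at hlast hub ⊢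
      omega
    simp only [hflat2]
    rw [List.getElem_append_left hlt]
    simp only [List.getElem_map, List.getElem_range]
    push_cast
    ring

-- ===== VERDICT (by name: the statement is the Claim_ definition above) =====
theorem generategoal_spec : Claim_equal_generategoal := by
  intro dim _
  unfold Spec_generategoal
  by_cases hpos : 0 < dim
  · obtain ⟨n, rfl⟩ : ∃ n : Nat, dim = (n : Int) :=
      ⟨dim.toNat, (Int.toNat_of_nonneg hpos.le).symm⟩
    exact main_pos n (by exact_mod_cast hpos)
  · have h0 : (dim - 0).toNat = 0 := by omega
    unfold generategoal generategoal_alt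
    rw [if_pos (by omega : dim ≤ 0), PySem.List.pyRange_one, h0]
    simp
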